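-- pv_equiv track=rewrite | github.com/Namujjigi/algorithm_study | 220120/boj_15685_dg.py | make_dragon_curve
-- ===== SOURCE A (Python) =====
-- d = [(1, 0), (0, -1), (-1, 0), (0, 1)]
--
-- def make_dragon_curve(args):
--     r, c, di, g = args
--     ret = set()
--     vertex = [(r, c), (r + d[di][0], c + d[di][1])] # 0 gen
--     ret.add(vertex[0]); ret.add(vertex[1])
--     cur_pos = list(vertex[-1])
--     for _ in range(g):
--         # reverse traversal
--         N = len(vertex)
--         for i in range(N - 1, 0, -1):
--             # find next vertex
--             dr = vertex[i][0] - vertex[i - 1][0]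
--             dc = vertex[i][1] - vertex[i - 1][1]
--             ndr = dc
--             ndc = -dr
--             cur_pos[0] += ndr
--             cur_pos[1] += ndc
--             vertex.append(tuple(cur_pos))
--             ret.add(tuple(cur_pos))
--     return ret
-- ===== SOURCE B (Python) =====
-- d = [(1, 0), (0, -1), (-1, 0), (0, 1)]
--
-- def make_dragon_curve(args):
--     r, c, di, g = args
--     # build the full direction-code sequence first, then walk it once
--     dirs = [di % 4]
--     for _ in range(g):
--         dirs = dirs + [(x + 1) % 4 for x in reversed(dirs)]
--     ret = {(r, c)}
--     pr, pc = r, c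
--     for dd in dirs:
--         pr += d[dd][0]
--         pc += d[dd][1]
--         ret.add((pr, pc))
--     return ret
-- ===== Notes on version B (the rewrite author's own statement) =====
-- stated objective: alternative
-- what changed: B first builds the complete direction-code sequence by g reverse-and-rotate expansions ((x+1)%4 over reversed(dirs)) and then reconstructs the point set in one final walk, instead of A's per-generation reverse traversal of the growing vertex list with vector subtraction and rotation.
import Mathlib
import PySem

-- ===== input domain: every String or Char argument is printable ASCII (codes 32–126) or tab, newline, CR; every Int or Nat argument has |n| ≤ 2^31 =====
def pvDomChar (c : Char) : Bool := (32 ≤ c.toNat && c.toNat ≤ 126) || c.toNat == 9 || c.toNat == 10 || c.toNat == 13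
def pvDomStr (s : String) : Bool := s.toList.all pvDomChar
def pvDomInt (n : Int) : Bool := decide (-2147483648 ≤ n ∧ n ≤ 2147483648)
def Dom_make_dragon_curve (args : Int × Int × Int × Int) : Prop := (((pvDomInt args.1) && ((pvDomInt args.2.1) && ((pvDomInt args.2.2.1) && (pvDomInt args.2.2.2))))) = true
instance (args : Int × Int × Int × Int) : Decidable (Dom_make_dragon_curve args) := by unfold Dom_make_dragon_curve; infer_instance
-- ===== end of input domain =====

-- B builds the whole direction-code sequence by reverse-and-rotate expansion and then
-- walks it in one final pass, instead of A's per-generation re-traversal of the vertex list.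

-- ===== PORT A =====
def dA : List (Int × Int) := [(1, 0), (0, -1), (-1, 0), (0, 1)]

-- one iteration of A's inner loop body (state: vertex list, cur_pos, ret)
def pvInnerA (st : List (Int × Int) × (Int × Int) × PySem.Set (Int × Int)) (i : Int) :
    List (Int × Int) × (Int × Int) × PySem.Set (Int × Int) :=
  let a := (PySem.List.pyGet? st.1 i).getD (0, 0)
  let b := (PySem.List.pyGet? st.1 (i - 1)).getD (0, 0)
  let dr := a.1 - b.1
  let dc := a.2 - b.2
  let ndr := dc
  let ndc := -dr
  let cur := (st.2.1.1 + ndr, st.2.1.2 + ndc)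
  (st.1 ++ [cur], cur, PySem.Set.add st.2.2 cur)

-- one generation of A's outer loop
def pvGenA (st : List (Int × Int) × (Int × Int) × PySem.Set (Int × Int)) (_ : Nat) :
    List (Int × Int) × (Int × Int) × PySem.Set (Int × Int) :=
  (PySem.List.pyRange ((st.1.length : Int) - 1) 0 (-1)).foldl pvInnerA st

def make_dragon_curve (args : Int × Int × Int × Int) : List (Int × Int) :=
  let r := args.1
  let c := args.2.1
  let di := args.2.2.1
  let g := args.2.2.2
  let dd := (PySem.List.pyGet? dA di).getD (0, 0)
  let v0 : Int × Int := (r, c)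
  let v1 : Int × Int := (r + dd.1, c + dd.2)
  let ret := PySem.Set.add (PySem.Set.add PySem.Set.empty v0) v1
  ((List.range g.toNat).foldl pvGenA ([v0, v1], v1, ret)).2.2

-- ===== PORT B =====
def pvStepCode (x : Int) : Int := PySem.Int.mod (x + 1) 4

def pvExpandB (ds : List Int) : List Int := ds ++ ds.reverse.map pvStepCode

def pvWalkB (st : (Int × Int) × PySem.Set (Int × Int)) (dd : Int) :
    (Int × Int) × PySem.Set (Int × Int) :=
  let v := (PySem.List.pyGet? dA dd).getD (0, 0)
  let p := (st.1.1 + v.1, st.1.2 + v.2)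
  (p, PySem.Set.add st.2 p)

def make_dragon_curve_alt (args : Int × Int × Int × Int) : List (Int × Int) :=
  let r := args.1
  let c := args.2.1
  let di := args.2.2.1
  let g := args.2.2.2
  let dirs := (List.range g.toNat).foldl (fun ds _ => pvExpandB ds) [PySem.Int.mod di 4]
  (dirs.foldl pvWalkB ((r, c), PySem.Set.add PySem.Set.empty (r, c))).2

-- ===== PRECONDITION & SPEC =====
-- Pre_ excludes exactly the inputs where A raises IndexError: d[di] needs -4 ≤ di < 4.
def Pre_make_dragon_curve (args : Int × Int × Int × Int) : Prop :=
  -4 ≤ args.2.2.1 ∧ args.2.2.1 < 4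
instance (args : Int × Int × Int × Int) : Decidable (Pre_make_dragon_curve args) := by
  unfold Pre_make_dragon_curve; infer_instance

def pvWitness_make_dragon_curve : (Int × Int × Int × Int) := (0, 0, 0, 2)

def Spec_make_dragon_curve (args : Int × Int × Int × Int) (out : List (Int × Int)) : Prop := out = make_dragon_curve_alt args
instance (args : Int × Int × Int × Int) (out : List (Int × Int)) : Decidable (Spec_make_dragon_curve args out) := by unfold Spec_make_dragon_curve; infer_instance

-- ===== CLAIM (what is proved, stated in full; the proofs are below) =====
def Claim_equal_make_dragon_curve : Prop := ∀ (args : Int × Int × Int × Int), Dom_make_dragon_curve args → Pre_make_dragon_curve args → Spec_make_dragon_curve args (make_dragon_curve args)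

-- ===== LEMMAS AND PROOFS =====

-- geometric vocabulary used only by the proofs
def rot (v : Int × Int) : Int × Int := (v.2, -v.1)
def padd (p v : Int × Int) : Int × Int := (p.1 + v.1, p.2 + v.2)
def dvec (x : Int) : Int × Int := (PySem.List.pyGet? dA x).getD (0, 0)

-- the points visited when walking from p along the vector list vs (p excluded)
def pts (p : Int × Int) : List (Int × Int) → List (Int × Int)
  | [] => []
  | v :: vs => padd p v :: pts (padd p v) vs

def endPt (p : Int × Int) (vs : List (Int × Int)) : Int × Int := vs.foldl padd p

def expandV (vs : List (Int × Int)) : List (Int × Int) := vs ++ vs.reverse.map rot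

def vecIter : Nat → List (Int × Int) → List (Int × Int)
  | 0, vs => vs
  | n + 1, vs => expandV (vecIter n vs)

def dirsIterB : Nat → List Int → List Int
  | 0, ds => ds
  | n + 1, ds => pvExpandB (dirsIterB n ds)

theorem endPt_cons (p v : Int × Int) (vs : List (Int × Int)) :
    endPt p (v :: vs) = endPt (padd p v) vs := rfl

theorem endPt_append (p : Int × Int) (u v : List (Int × Int)) :
    endPt p (u ++ v) = endPt (endPt p u) v := List.foldl_append

theorem pts_append (u : List (Int × Int)) : ∀ (p : Int × Int) (v : List (Int × Int)),
    pts p (u ++ v) = pts p u ++ pts (endPt p u) v := by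
  induction u with
  | nil => intro p v; rfl
  | cons w u ih => intro p v; simp [pts, ih (padd p w) v, endPt_cons]

theorem pts_length (vs : List (Int × Int)) : ∀ p, (pts p vs).length = vs.length := by
  induction vs with
  | nil => intro p; rfl
  | cons v vs ih => intro p; simp [pts, ih]

theorem getPath (vs : List (Int × Int)) : ∀ (p : Int × Int) (j : Nat), j ≤ vs.length →
    (p :: pts p vs)[j]? = some (endPt p (vs.take j)) := by
  induction vs with
  | nil =>
    intro p j hj
    have : j = 0 := Nat.le_zero.mp hj
    subst this; rfl
  | cons v vs ih =>
    intro p j hj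
    cases j with
    | zero => rfl
    | succ m =>
      have hm : m ≤ vs.length := by simpa using hj
      simpa [pts, endPt_cons, List.take_succ_cons] using ih (padd p v) m hm

-- the descending inner loop of A, characterised
theorem foldDesc (p : Int × Int) (vs : List (Int × Int)) :
    ∀ (k : Nat), k ≤ vs.length → ∀ (E : List (Int × Int)) (cur : Int × Int)
      (ret : PySem.Set (Int × Int)),
    (PySem.List.pyRange (k : Int) 0 (-1)).foldl pvInnerA ((p :: pts p vs) ++ E, cur, ret)
      = ((p :: pts p vs) ++ E ++ pts cur ((vs.take k).reverse.map rot),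
         endPt cur ((vs.take k).reverse.map rot),
         List.foldl PySem.Set.add ret (pts cur ((vs.take k).reverse.map rot))) := by
  intro k
  induction k with
  | zero =>
    intro _ E cur ret
    rw [show ((0 : Nat) : Int) = 0 by norm_num, PySem.List.pyRange_neg_one_eq_nil (by norm_num)]
    simp [pts, endPt]
  | succ m ih =>
    intro hk E cur ret
    have hm : m ≤ vs.length := Nat.le_of_succ_le hk
    have hmlt : m < vs.length := hk
    have hlen : (p :: pts p vs).length = vs.length + 1 := by simp [pts_length]
    have hcons : PySem.List.pyRange ((m + 1 : Nat) : Int) 0 (-1)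
        = ((m + 1 : Nat) : Int) :: PySem.List.pyRange (((m + 1 : Nat) : Int) - 1) 0 (-1) :=
      PySem.List.pyRange_neg_one_cons (by exact_mod_cast Nat.succ_pos m)
    have hidx : ((m + 1 : Nat) : Int) - 1 = ((m : Nat) : Int) := by push_cast; ring
    have hvsm : vs.take (m + 1) = vs.take m ++ [vs[m]] := by
      rw [List.take_add_one, List.getElem?_eq_getElem hmlt]; rfl
    have ha : (PySem.List.pyGet? ((p :: pts p vs) ++ E) ((m + 1 : Nat) : Int)).getD (0, 0)
        = endPt p (vs.take (m + 1)) := by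
      rw [PySem.List.pyGet?_natCast, List.getElem?_append_left (by omega),
        getPath vs p (m + 1) hk]; rfl
    have hb : (PySem.List.pyGet? ((p :: pts p vs) ++ E) (((m + 1 : Nat) : Int) - 1)).getD (0, 0)
        = endPt p (vs.take m) := by
      rw [hidx, PySem.List.pyGet?_natCast, List.getElem?_append_left (by omega),
        getPath vs p m hm]; rfl
    have hab : endPt p (vs.take (m + 1)) = padd (endPt p (vs.take m)) vs[m] := by
      rw [hvsm, endPt_append]; rfl
    have hstep : pvInnerA ((p :: pts p vs) ++ E, cur, ret) ((m + 1 : Nat) : Int)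
        = ((p :: pts p vs) ++ (E ++ [padd cur (rot vs[m])]), padd cur (rot vs[m]),
           PySem.Set.add ret (padd cur (rot vs[m]))) := by
      simp only [pvInnerA, ha, hb, hab]
      simp [padd, rot, List.append_assoc]
    have hW : (vs.take (m + 1)).reverse.map rot
        = rot vs[m] :: (vs.take m).reverse.map rot := by
      rw [hvsm]
      simp only [List.reverse_append, List.reverse_singleton, List.singleton_append,
        List.map_cons]
    rw [hcons, hidx, List.foldl_cons, hstep, ih hm (E ++ [padd cur (rot vs[m])])
      (padd cur (rot vs[m])) (PySem.Set.add ret (padd cur (rot vs[m]))), hW]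
    simp [pts, endPt_cons, List.append_assoc]

theorem genA_eq (p : Int × Int) (vs : List (Int × Int)) (ret : PySem.Set (Int × Int)) (n : Nat) :
    pvGenA (p :: pts p vs, endPt p vs, ret) n
      = (p :: pts p (expandV vs), endPt p (expandV vs),
         List.foldl PySem.Set.add ret (pts (endPt p vs) (vs.reverse.map rot))) := by
  have hlen : (((p :: pts p vs).length : Int)) - 1 = ((vs.length : Nat) : Int) := by
    simp [pts_length]
  have h := foldDesc p vs vs.length (le_refl _) [] (endPt p vs) ret
  simp only [List.take_length, List.append_nil] at h
  show (PySem.List.pyRange (((p :: pts p vs).length : Int) - 1) 0 (-1)).foldl pvInnerA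
      (p :: pts p vs, endPt p vs, ret) = _
  rw [hlen, h]
  simp [expandV, pts_append, endPt_append]

theorem outerA (p : Int × Int) (vs : List (Int × Int)) : ∀ (n : Nat),
    (List.range n).foldl pvGenA
        (p :: pts p vs, endPt p vs, List.foldl PySem.Set.add PySem.Set.empty (p :: pts p vs))
      = (p :: pts p (vecIter n vs), endPt p (vecIter n vs),
         List.foldl PySem.Set.add PySem.Set.empty (p :: pts p (vecIter n vs))) := by
  intro n
  induction n with
  | zero => simp [vecIter]
  | succ n ih =>
    rw [List.range_succ, List.foldl_append, List.foldl_cons, List.foldl_nil, ih, genA_eq]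
    have hsplit : p :: pts p (expandV (vecIter n vs))
        = (p :: pts p (vecIter n vs)) ++ pts (endPt p (vecIter n vs))
            ((vecIter n vs).reverse.map rot) := by
      simp [expandV, pts_append]
    rw [show vecIter (n + 1) vs = expandV (vecIter n vs) from rfl, hsplit, List.foldl_append]

theorem dvec_stepCode (x : Int) (h0 : 0 ≤ x) (h1 : x < 4) :
    dvec (pvStepCode x) = rot (dvec x) := by
  interval_cases x <;> rfl

theorem stepCode_range (x : Int) : 0 ≤ pvStepCode x ∧ pvStepCode x < 4 :=
  ⟨PySem.Int.mod_nonneg _ (by norm_num), PySem.Int.mod_lt _ (by norm_num)⟩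

theorem mapIterB (ds : List Int) (h : ∀ x ∈ ds, 0 ≤ x ∧ x < 4) : ∀ n : Nat,
    (dirsIterB n ds).map dvec = vecIter n (ds.map dvec)
    ∧ (∀ x ∈ dirsIterB n ds, 0 ≤ x ∧ x < 4) := by
  intro n
  induction n with
  | zero => exact ⟨rfl, h⟩
  | succ n ih =>
    obtain ⟨h1, h2⟩ := ih
    constructor
    · show (pvExpandB (dirsIterB n ds)).map dvec = expandV (vecIter n (ds.map dvec))
      rw [← h1]
      simp only [pvExpandB, expandV, List.map_append, List.map_reverse, List.map_map]
      congr 1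
      refine congrArg List.reverse ?_
      refine List.map_congr_left (fun x hx => ?_)
      exact dvec_stepCode x (h2 x hx).1 (h2 x hx).2
    · intro x hx
      rcases List.mem_append.mp hx with hx | hx
      · exact h2 x hx
      · obtain ⟨y, _, rfl⟩ := List.mem_map.mp hx
        exact stepCode_range y

theorem foldB_dirs (ds : List Int) : ∀ n : Nat,
    (List.range n).foldl (fun l _ => pvExpandB l) ds = dirsIterB n ds := by
  intro n
  induction n with
  | zero => rfl
  | succ n ih => rw [List.range_succ, List.foldl_append]; simp [dirsIterB, ih]

theorem walkB (ds : List Int) : ∀ (p : Int × Int) (ret : PySem.Set (Int × Int)),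
    ds.foldl pvWalkB (p, ret)
      = (endPt p (ds.map dvec), List.foldl PySem.Set.add ret (pts p (ds.map dvec))) := by
  induction ds with
  | nil => intro p ret; simp [pts, endPt]
  | cons dd ds ih =>
    intro p ret
    have hstep : pvWalkB (p, ret) dd = (padd p (dvec dd), PySem.Set.add ret (padd p (dvec dd))) := rfl
    rw [List.foldl_cons, hstep, ih]
    simp [pts, endPt_cons]

theorem init_dir (di : Int) (h0 : -4 ≤ di) (h1 : di < 4) :
    (PySem.List.pyGet? dA di).getD (0, 0) = dvec (PySem.Int.mod di 4) := by
  interval_cases di <;> rfl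

-- ===== VERDICT (by name: the statement is the Claim_ definition above) =====
theorem make_dragon_curve_spec : Claim_equal_make_dragon_curve := by
  intro args _ hpre
  obtain ⟨r, c, di, g⟩ := args
  obtain ⟨h0, h1⟩ := hpre
  have hd : (PySem.List.pyGet? dA di).getD (0, 0) = dvec (PySem.Int.mod di 4) :=
    init_dir di h0 h1
  have hrange : ∀ x ∈ [PySem.Int.mod di 4], 0 ≤ x ∧ x < 4 := by
    intro x hx
    rw [List.mem_singleton.mp hx]
    exact ⟨PySem.Int.mod_nonneg di (by norm_num), PySem.Int.mod_lt di (by norm_num)⟩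
  have hA := outerA (r, c) [dvec (PySem.Int.mod di 4)] g.toNat
  have hB := walkB (dirsIterB g.toNat [PySem.Int.mod di 4]) (r, c)
    (PySem.Set.add PySem.Set.empty (r, c))
  have hmap : (dirsIterB g.toNat [PySem.Int.mod di 4]).map dvec
      = vecIter g.toNat [dvec (PySem.Int.mod di 4)] := by
    have := (mapIterB [PySem.Int.mod di 4] hrange g.toNat).1
    simpa using this
  show make_dragon_curve (r, c, di, g) = make_dragon_curve_alt (r, c, di, g)
  simp only [make_dragon_curve, make_dragon_curve_alt]
  rw [hd, foldB_dirs, hB, hmap]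
  simp only [pts, endPt, padd, List.foldl] at hA
  rw [hA]
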